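-- pv_equiv track=rewrite | github.com/MrBrantCode/unitest_baseline | mut_generate/mist_train_taco/taco_2831/solution.py | find_best_rotation_index
-- ===== SOURCE A (Python) =====
-- def find_best_rotation_index(A):
--     def rotate_array(arr, k):
--         """ Rotate array `arr` by `k` positions to the right. """
--         n = len(arr)
--         return arr[-k:] + arr[:-k]
--
--     def calculate_score(arr):
--         """ Calculate the score of the array based on the given rules. """
--         score = 0
--         for i, value in enumerate(arr):
--             if value <= i:
--                 score += 1
--         return score
--
--     n = len(A)
--     max_score = -1
--     best_k = 0
--
--     for k in range(n):
--         rotated_A = rotate_array(A, k)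
--         current_score = calculate_score(rotated_A)
--
--         if current_score > max_score:
--             max_score = current_score
--             best_k = k
--         elif current_score == max_score and k < best_k:
--             best_k = k
--
--     return best_k
-- ===== SOURCE B (Python) =====
-- def find_best_rotation_index(A):
--     n = len(A)
--     if n == 0:
--         return 0
--     # Difference array: element A[j] contributes 1 to rotation k iff A[j] <= (j+k) % n,
--     # i.e. for k in a cyclic interval; mark its endpoints instead of rescoring each rotation.
--     diff = [0] * (n + 1)
--     for j, v in enumerate(A):
--         if v <= 0:
--             diff[0] += 1
--             diff[n] -= 1
--         elif v < n:
--             lo = v - j if v >= j else v - j + n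
--             hi = n - 1 - j
--             if lo <= hi:
--                 diff[lo] += 1
--                 diff[hi + 1] -= 1
--             else:
--                 diff[0] += 1
--                 diff[hi + 1] -= 1
--                 diff[lo] += 1
--                 diff[n] -= 1
--         # v >= n contributes to no rotation
--     scores = []
--     s = 0
--     for k in range(n):
--         s += diff[k]
--         scores.append(s)
--     best_k, best_s = 0, -1
--     for k, sc in enumerate(scores):
--         if sc > best_s:
--             best_s, best_k = sc, k
--     return best_k
-- ===== Notes on version B (the rewrite author's own statement) =====
-- stated objective: faster
-- what changed: Instead of building every rotated copy of the array and rescoring it (quadratic), B marks each element's cyclic interval of rotations in a difference array, recovers all rotation scores by one prefix-sum pass, and takes the first argmax.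
import Mathlib
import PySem

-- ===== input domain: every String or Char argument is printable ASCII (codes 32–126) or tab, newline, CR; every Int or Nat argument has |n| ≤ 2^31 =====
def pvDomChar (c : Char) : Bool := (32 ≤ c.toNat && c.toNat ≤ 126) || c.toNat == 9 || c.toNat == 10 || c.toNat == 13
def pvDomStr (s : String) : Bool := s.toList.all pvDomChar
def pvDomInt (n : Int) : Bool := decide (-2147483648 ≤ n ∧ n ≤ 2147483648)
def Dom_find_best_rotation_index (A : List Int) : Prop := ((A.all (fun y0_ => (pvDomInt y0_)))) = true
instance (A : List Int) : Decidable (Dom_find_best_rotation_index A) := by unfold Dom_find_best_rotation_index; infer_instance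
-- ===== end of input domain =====

-- B replaces A's rescoring of every rotation (building each rotated copy, O(n^2)) by a
-- difference array over the cyclic interval of rotations each element scores in, O(n).

-- ===== PORT A =====
-- rotate_array(arr, k) = arr[-k:] + arr[:-k]
def pvRotateArray (arr : List Int) (k : Int) : List Int :=
  PySem.List.slice arr (some (-k)) none ++ PySem.List.slice arr none (some (-k))

-- calculate_score: score += 1 whenever value <= index
def pvCalculateScore (arr : List Int) : Int :=
  (PySem.List.enumerate arr).foldl (fun score p => if p.2 ≤ p.1 then score + 1 else score) 0

def find_best_rotation_index (A : List Int) : Int :=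
  ((PySem.List.pyRange 0 (A.length : Int) 1).foldl (fun (st : Int × Int) k =>
      let current := pvCalculateScore (pvRotateArray A k)
      if current > st.1 then (current, k)
      else if current = st.1 ∧ k < st.2 then (st.1, k)
      else st) (-1, 0)).2

-- ===== PORT B =====
-- diff[i] += x (every index used is in range, so List.modify is exact for Python's diff[i] += x)
def pvBump (d : List Int) (i : Nat) (x : Int) : List Int := d.modify i (· + x)

-- one element (j, v) of enumerate(A): mark the endpoints of its interval of rotations
def pvApplyElem (n : Nat) (d : List Int) (p : Int × Int) : List Int :=
  if p.2 ≤ 0 then pvBump (pvBump d 0 1) n (-1)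
  else if p.2 < (n : Int) then
    let lo : Int := if p.1 ≤ p.2 then p.2 - p.1 else p.2 - p.1 + n
    let hi : Int := (n : Int) - 1 - p.1
    if lo ≤ hi then pvBump (pvBump d lo.toNat 1) (hi.toNat + 1) (-1)
    else pvBump (pvBump (pvBump (pvBump d 0 1) (hi.toNat + 1) (-1)) lo.toNat 1) n (-1)
  else d

def find_best_rotation_index_alt (A : List Int) : Int :=
  let n := A.length
  if n = 0 then 0 else
  let diff := (PySem.List.enumerate A).foldl (pvApplyElem n) (List.replicate (n + 1) 0)
  let scores := ((List.range n).foldl (fun (acc : List Int × Int) k =>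
      (acc.1 ++ [acc.2 + diff.getD k 0], acc.2 + diff.getD k 0)) ([], 0)).1
  ((PySem.List.enumerate scores).foldl (fun (st : Int × Int) p =>
      if p.2 > st.2 then (p.1, p.2) else st) (0, -1)).1

-- ===== PRECONDITION & SPEC =====
def Spec_find_best_rotation_index (A : List Int) (out : Int) : Prop := out = find_best_rotation_index_alt A
instance (A : List Int) (out : Int) : Decidable (Spec_find_best_rotation_index A out) := by unfold Spec_find_best_rotation_index; infer_instance

-- ===== CLAIM (what is proved, stated in full; the proofs are below) =====
def Claim_equal_find_best_rotation_index : Prop := ∀ (A : List Int), Dom_find_best_rotation_index A → Spec_find_best_rotation_index A (find_best_rotation_index A)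

-- ===== LEMMAS AND PROOFS =====

-- the index element j lands on after rotating right by k, as the branchless form (j+k) mod n
def pvPos (n : Nat) (j : Int) (k : Nat) : Int := if j + k < (n : Int) then j + k else j + k - n

-- 1 iff element (j, v) scores in rotation k
def pvInd (n : Nat) (j : Int) (k : Nat) (v : Int) : Int := if v ≤ pvPos n j k then 1 else 0

-- total score of rotation k, summed element by element starting at index j
def pvSum (n k : Nat) (j : Int) : List Int → Int
  | [] => 0
  | v :: t => pvInd n j k v + pvSum n k (j + 1) t

def pvS (A : List Int) (k : Nat) : Int := pvSum A.length k 0 A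

-- running count of "value ≤ index" with the index starting at s
def pvCnt (s : Int) : List Int → Int
  | [] => 0
  | v :: t => (if v ≤ s then 1 else 0) + pvCnt (s + 1) t

theorem pvCalc_go (l : List Int) (s a : Int) :
    (PySem.List.enumerate l s).foldl (fun score p => if p.2 ≤ p.1 then score + 1 else score) a
      = a + pvCnt s l := by
  induction l generalizing s a with
  | nil => simp [PySem.List.enumerate, pvCnt]
  | cons v t ih => simp [PySem.List.enumerate_cons, pvCnt, ih]; split <;> ring

theorem pvCnt_append (X Y : List Int) (s : Int) :
    pvCnt s (X ++ Y) = pvCnt s X + pvCnt (s + X.length) Y := by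
  induction X generalizing s with
  | nil => simp [pvCnt]
  | cons v t ih => simp [pvCnt, ih]; push_cast; ring_nf

theorem pvSum_append (n k : Nat) (X Y : List Int) (j : Int) :
    pvSum n k j (X ++ Y) = pvSum n k j X + pvSum n k (j + X.length) Y := by
  induction X generalizing j with
  | nil => simp [pvSum]
  | cons v t ih => simp [pvSum, ih]; push_cast; ring_nf

theorem pvRotate_eq (A : List Int) (k : Nat) (hk : k ≤ A.length) :
    pvRotateArray A (k : Int) = A.drop (A.length - k) ++ A.take (A.length - k) := by
  rcases Nat.eq_zero_or_pos k with rfl | hpos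
  · show PySem.List.slice A (some (-(0 : Nat))) none ++ PySem.List.slice A none (some (-(0 : Nat))) = _
    simp [PySem.List.slice, PySem.List.clampIdx]
  · have hc : PySem.List.clampIdx A.length (-(k : Int)) = A.length - k := by
      unfold PySem.List.clampIdx
      split_ifs <;> omega
    unfold pvRotateArray PySem.List.slice
    dsimp only
    rw [hc]
    congr 1
    · exact List.take_of_length_le (by simp)

theorem pvSum_low (n k : Nat) (l : List Int) (j : Int) (h0 : 0 ≤ j)
    (h : j + l.length + k ≤ (n : Int)) : pvSum n k j l = pvCnt (k + j) l := by
  induction l generalizing j with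
  | nil => simp [pvSum, pvCnt]
  | cons v t ih =>
    simp only [pvSum, pvCnt, List.length_cons] at *
    rw [ih (j + 1) (by omega) (by push_cast at h ⊢; omega)]
    have hlt : j + (k : Int) < (n : Int) := by push_cast at h; omega
    have hhead : pvInd n j k v = if v ≤ (k : Int) + j then 1 else 0 := by
      unfold pvInd pvPos; split_ifs <;> omega
    rw [hhead, show (k : Int) + (j + 1) = (k : Int) + j + 1 from by ring]

theorem pvSum_high (n k : Nat) (l : List Int) (j : Int) (hk : (k : Int) ≤ n)
    (h0 : (n : Int) ≤ j + k) (h : j + l.length ≤ (n : Int)) :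
    pvSum n k j l = pvCnt (j + k - n) l := by
  induction l generalizing j with
  | nil => simp [pvSum, pvCnt]
  | cons v t ih =>
    simp only [pvSum, pvCnt, List.length_cons] at *
    rw [ih (j + 1) (by omega) (by push_cast at h ⊢; omega)]
    have hhead : pvInd n j k v = if v ≤ j + (k : Int) - n then 1 else 0 := by
      unfold pvInd pvPos; split_ifs <;> omega
    rw [hhead, show j + 1 + (k : Int) - n = j + (k : Int) - n + 1 from by ring]

-- A's score of the k-th rotation is the element-indexed sum pvS
theorem pvSum_split (n k : Nat) (T D : List Int) (hk : k ≤ n)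
    (hT : T.length + k = n) (hD : T.length + D.length = n) :
    pvSum n k 0 (T ++ D) = pvCnt (k : Int) T + pvCnt 0 D := by
  rw [pvSum_append, pvSum_low n k T 0 (by omega) (by push_cast; omega),
      pvSum_high n k D (0 + T.length) (by push_cast; omega) (by push_cast; omega)
        (by push_cast; omega)]
  rw [show (k : Int) + 0 = (k : Int) from by ring,
      show (0 : Int) + T.length + k - n = 0 from by push_cast; omega]

theorem pvScore_eq (A : List Int) (k : Nat) (hk : k ≤ A.length) :
    pvCalculateScore (pvRotateArray A (k : Int)) = pvS A k := by
  rw [pvRotate_eq A k hk]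
  unfold pvCalculateScore pvS
  rw [pvCalc_go _ 0 0, zero_add, pvCnt_append]
  rw [show pvSum A.length k 0 A
        = pvSum A.length k 0 (A.take (A.length - k) ++ A.drop (A.length - k)) from by
      rw [List.take_append_drop]]
  rw [pvSum_split A.length k _ _ hk (by simp; omega) (by simp)]
  rw [show ((0 : Int) + (A.drop (A.length - k)).length) = (k : Int) from by
      simp; omega]
  ring

-- prefix-sum effect of one in-range bump
theorem pvTakeSum_modify (d : List Int) (i m : Nat) (x : Int) (hi : i < d.length) :
    ((d.modify i (· + x)).take m).sum = (d.take m).sum + if i < m then x else 0 := by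
  induction d generalizing i m with
  | nil => simp at hi
  | cons a t ih =>
    cases i with
    | zero => cases m <;> simp [List.modify_zero_cons] <;> ring
    | succ i' =>
      cases m with
      | zero => simp
      | succ m' =>
        rw [List.modify_succ_cons]
        simp only [List.take, List.sum_cons, List.length_cons] at *
        rw [ih i' m' (by omega)]
        have : (i' + 1 < m' + 1 ↔ i' < m') := by omega
        simp [this]; ring_nf

theorem pvApplyElem_length (n : Nat) (d : List Int) (p : Int × Int) :
    (pvApplyElem n d p).length = d.length := by
  unfold pvApplyElem pvBump; dsimp only; split_ifs <;> simp

-- one element changes the k-th prefix sum by exactly its indicator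
theorem pvElem_inc (n k : Nat) (j v : Int) (d : List Int) (hd : d.length = n + 1)
    (hj0 : 0 ≤ j) (hj : j < (n : Int)) (hk : k < n) :
    ((pvApplyElem n d (j, v)).take (k + 1)).sum = (d.take (k + 1)).sum + pvInd n j k v := by
  unfold pvApplyElem pvBump
  dsimp only
  split_ifs with hv0 hvn hjv hlo hlo2
  · rw [pvTakeSum_modify _ _ _ _ (by simp only [List.length_modify, hd]; omega),
        pvTakeSum_modify _ _ _ _ (by simp only [List.length_modify, hd]; omega)]
    unfold pvInd pvPos; split_ifs <;> omega
  · rw [pvTakeSum_modify _ _ _ _ (by simp only [List.length_modify, hd]; omega),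
        pvTakeSum_modify _ _ _ _ (by simp only [List.length_modify, hd]; omega)]
    unfold pvInd pvPos; split_ifs <;> omega
  · rw [pvTakeSum_modify _ _ _ _ (by simp only [List.length_modify, hd]; omega),
        pvTakeSum_modify _ _ _ _ (by simp only [List.length_modify, hd]; omega),
        pvTakeSum_modify _ _ _ _ (by simp only [List.length_modify, hd]; omega),
        pvTakeSum_modify _ _ _ _ (by simp only [List.length_modify, hd]; omega)]
    unfold pvInd pvPos; split_ifs <;> omega
  · rw [pvTakeSum_modify _ _ _ _ (by simp only [List.length_modify, hd]; omega),
        pvTakeSum_modify _ _ _ _ (by simp only [List.length_modify, hd]; omega)]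
    unfold pvInd pvPos; split_ifs <;> omega
  · rw [pvTakeSum_modify _ _ _ _ (by simp only [List.length_modify, hd]; omega),
        pvTakeSum_modify _ _ _ _ (by simp only [List.length_modify, hd]; omega),
        pvTakeSum_modify _ _ _ _ (by simp only [List.length_modify, hd]; omega),
        pvTakeSum_modify _ _ _ _ (by simp only [List.length_modify, hd]; omega)]
    unfold pvInd pvPos; split_ifs <;> omega
  · unfold pvInd pvPos; split_ifs <;> omega

-- the whole diff fold: prefix sums are the rotation scores
theorem pvDiff_fold (n k : Nat) (l : List Int) (j : Int) (d : List Int)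
    (hd : d.length = n + 1) (hj0 : 0 ≤ j) (hj : j + l.length ≤ (n : Int)) (hk : k < n) :
    (((PySem.List.enumerate l j).foldl (pvApplyElem n) d).take (k + 1)).sum
      = (d.take (k + 1)).sum + pvSum n k j l := by
  induction l generalizing j d with
  | nil => simp [PySem.List.enumerate, pvSum]
  | cons v t ih =>
    simp only [PySem.List.enumerate_cons, List.foldl_cons, pvSum, List.length_cons] at *
    rw [ih (j + 1) (pvApplyElem n d (j, v)) (by rw [pvApplyElem_length]; exact hd)
        (by omega) (by push_cast at hj ⊢; omega)]
    rw [pvElem_inc n k j v d hd hj0 (by push_cast at hj; omega) hk]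
    ring

theorem pvFold_length (n : Nat) (l : List Int) (j : Int) (d : List Int) :
    ((PySem.List.enumerate l j).foldl (pvApplyElem n) d).length = d.length := by
  induction l generalizing j d with
  | nil => simp [PySem.List.enumerate]
  | cons v t ih => simp [PySem.List.enumerate_cons, ih, pvApplyElem_length]

theorem pvTake_succ_sum (d : List Int) (k : Nat) (hk : k < d.length) :
    (d.take (k + 1)).sum = (d.take k).sum + d.getD k 0 := by
  rw [List.take_add_one, List.getElem?_eq_getElem hk]
  rw [List.sum_append]
  simp [List.getD, List.getElem?_eq_getElem hk]

-- the scores loop produces the list of prefix sums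
theorem pvScores_fold (diff : List Int) (m : Nat) (hm : m ≤ diff.length) :
    ((List.range m).foldl (fun (acc : List Int × Int) k =>
        (acc.1 ++ [acc.2 + diff.getD k 0], acc.2 + diff.getD k 0)) ([], 0))
      = ((List.range m).map (fun k => (diff.take (k + 1)).sum), (diff.take m).sum) := by
  induction m with
  | zero => simp
  | succ m' ih =>
    rw [List.range_succ, List.foldl_append, List.map_append, ih (by omega)]
    simp [pvTake_succ_sum diff m' (by omega)]

-- enumerate over a mapped list / over range'
theorem pvEnum_map {α β : Type} (f : α → β) (l : List α) (s : Int) :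
    PySem.List.enumerate (l.map f) s = (PySem.List.enumerate l s).map (fun p => (p.1, f p.2)) := by
  induction l generalizing s with
  | nil => simp [PySem.List.enumerate]
  | cons v t ih => simp [PySem.List.enumerate_cons, ih]

theorem pvEnum_range' (m a : Nat) :
    PySem.List.enumerate (List.range' a m) (a : Int) = (List.range' a m).map (fun (k : Nat) => (Prod.mk (α := Int) (β := Nat) k k)) := by
  induction m generalizing a with
  | zero => rfl
  | succ m' ih =>
    rw [List.range'_succ, PySem.List.enumerate_cons, List.map_cons]
    rw [show (a : Int) + 1 = ((a + 1 : Nat) : Int) from by push_cast; ring, ih (a + 1)]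

-- A's tie-break branch is dead on an increasing index list: the fold is the plain first-argmax
theorem pvFoldA_dead (f : Nat → Int) (ks : List Nat) (st : Int × Int)
    (hmono : List.Pairwise (· < ·) ks) (hlb : ∀ k ∈ ks, st.2 ≤ (k : Int)) :
    ks.foldl (fun (st : Int × Int) k =>
        if f k > st.1 then (f k, (k : Int))
        else if f k = st.1 ∧ (k : Int) < st.2 then (st.1, (k : Int)) else st) st
    = ks.foldl (fun (st : Int × Int) k => if f k > st.1 then (f k, (k : Int)) else st) st := by
  induction ks generalizing st with
  | nil => rfl
  | cons k t ih =>
    simp only [List.foldl_cons]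
    have hkst : ¬ ((k : Int) < st.2) := by have := hlb k (by simp); omega
    have hpw := (List.pairwise_cons.mp hmono)
    by_cases h : f k > st.1
    · simp only [if_pos h]
      exact ih _ hpw.2 (fun k' hk' => by have := hpw.1 k' hk'; simp; omega)
    · simp only [if_neg h, hkst, and_false, if_false]
      exact ih _ hpw.2 (fun k' hk' => by have := hpw.1 k' hk'; have := hlb k' (by simp [hk']); omega)

-- the two argmax folds are component swaps of each other
theorem pvFold_swap (f : Nat → Int) (ks : List Nat) (st : Int × Int) :
    ks.foldl (fun (st : Int × Int) k => if f k > st.2 then ((k : Int), f k) else st) (st.2, st.1)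
      = ((ks.foldl (fun (st : Int × Int) k => if f k > st.1 then (f k, (k : Int)) else st) st).2,
         (ks.foldl (fun (st : Int × Int) k => if f k > st.1 then (f k, (k : Int)) else st) st).1) := by
  induction ks generalizing st with
  | nil => rfl
  | cons k t ih =>
    simp only [List.foldl_cons]
    by_cases h : f k > st.1
    · rw [if_pos h, if_pos (show f k > (st.2, st.1).2 from h)]
      exact ih (f k, (k : Int))
    · rw [if_neg h, if_neg (show ¬ f k > (st.2, st.1).2 from h)]
      exact ih st

-- ===== VERDICT (by name: the statement is the Claim_ definition above) =====
theorem find_best_rotation_index_spec : Claim_equal_find_best_rotation_index := by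
  unfold Claim_equal_find_best_rotation_index Spec_find_best_rotation_index
  intro A _
  by_cases hn : A.length = 0
  · rw [List.length_eq_zero_iff] at hn; subst hn; rfl
  -- A's side: scores via pvS, dead tie-break branch removed
  have hA : find_best_rotation_index A
      = ((List.range A.length).foldl
          (fun (st : Int × Int) k => if pvS A k > st.1 then (pvS A k, (k : Int)) else st)
          (-1, 0)).2 := by
    unfold find_best_rotation_index
    rw [PySem.List.pyRange_zero_natCast, List.foldl_map]
    have hfe : ∀ (acc : Int × Int), ∀ x ∈ List.range A.length,
        (fun (st : Int × Int) (k : Nat) =>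
          let current := pvCalculateScore (pvRotateArray A (k : Int))
          if current > st.1 then (current, (k : Int))
          else if current = st.1 ∧ (k : Int) < st.2 then (st.1, (k : Int)) else st) acc x
        = (fun (st : Int × Int) (k : Nat) =>
          if pvS A k > st.1 then (pvS A k, (k : Int))
          else if pvS A k = st.1 ∧ (k : Int) < st.2 then (st.1, (k : Int)) else st) acc x := by
      intro acc x hx
      simp only [List.mem_range] at hx
      dsimp only
      rw [pvScore_eq A x (le_of_lt hx)]
    rw [PySem.List.foldl_congr_mem _ _ _ _ hfe]
    rw [pvFoldA_dead (pvS A) (List.range A.length) (-1, 0) List.pairwise_lt_range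
        (fun k _ => by simp)]
  -- B's side: the diff array's prefix sums are the same scores
  have hD : ((PySem.List.enumerate A).foldl (pvApplyElem A.length)
      (List.replicate (A.length + 1) 0)).length = A.length + 1 := by
    show ((PySem.List.enumerate A 0).foldl (pvApplyElem A.length) _).length = _
    rw [pvFold_length]; simp
  have hscores : ((List.range A.length).foldl (fun (acc : List Int × Int) k =>
        (acc.1 ++ [acc.2 + ((PySem.List.enumerate A).foldl (pvApplyElem A.length)
            (List.replicate (A.length + 1) 0)).getD k 0],
         acc.2 + ((PySem.List.enumerate A).foldl (pvApplyElem A.length)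
            (List.replicate (A.length + 1) 0)).getD k 0)) ([], 0)).1
      = (List.range A.length).map (pvS A) := by
    rw [pvScores_fold _ A.length (by omega)]
    apply List.map_congr_left
    intro k hk
    simp only [List.mem_range] at hk
    have h0 : ((List.replicate (A.length + 1) (0 : Int)).take (k + 1)).sum = 0 := by
      simp [List.take_replicate]
    have := pvDiff_fold A.length k A 0 (List.replicate (A.length + 1) 0)
      (by simp) le_rfl (by simp) hk
    rw [this, h0, zero_add, pvS]
  have henum : PySem.List.enumerate ((List.range A.length).map (pvS A)) 0
      = (List.range A.length).map (fun (k : Nat) => Prod.mk (α := Int) (β := Int) (k : Int) (pvS A k)) := by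
    rw [pvEnum_map]
    rw [show (0 : Int) = ((0 : Nat) : Int) from by simp, List.range_eq_range',
        pvEnum_range', List.map_map]
    rfl
  have hB : find_best_rotation_index_alt A
      = (((List.range A.length).foldl
          (fun (st : Int × Int) k => if pvS A k > st.2 then ((k : Int), pvS A k) else st)
          (0, -1))).1 := by
    unfold find_best_rotation_index_alt
    dsimp only
    rw [if_neg hn, hscores, henum, List.foldl_map]
  rw [hA, hB, pvFold_swap (pvS A) (List.range A.length) (-1, 0)]
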